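-- pv_equiv track=rewrite | github.com/101companies/101worker | modules/refinetokens/Tokenization.py | splitPenultimate
-- ===== SOURCE A (Python) =====
-- def splitPenultimate(token):
-- 	boundaries = []
-- 	lastStart = 0
-- 	for idx, char in enumerate(token):
-- 		if char.isupper():
-- 			if idx+1 < len(token) and token[idx+1].islower():
-- 				if idx-1 > 0:
-- 					boundaries.append(token[lastStart:idx])
-- 					lastStart = idx
--
-- 	boundaries.append(token[lastStart:len(token)])
-- 	return boundaries
-- ===== SOURCE B (Python) =====
-- def splitPenultimate(token):
--     # Recursive, right-to-left: find the LAST camelCase boundary, split there,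
--     # and recurse on the prefix; builds the result back-to-front.
--     for i in range(len(token) - 2, 1, -1):
--         if token[i].isupper() and token[i + 1].islower():
--             return splitPenultimate(token[:i]) + [token[i:]]
--     return [token]
-- ===== Notes on version B (the rewrite author's own statement) =====
-- stated objective: alternative
-- what changed: B replaces A's left-to-right accumulator scan by recursion from the right: it searches for the LAST camelCase boundary, splits there, recurses on the prefix and builds the result back-to-front.
import Mathlib
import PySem

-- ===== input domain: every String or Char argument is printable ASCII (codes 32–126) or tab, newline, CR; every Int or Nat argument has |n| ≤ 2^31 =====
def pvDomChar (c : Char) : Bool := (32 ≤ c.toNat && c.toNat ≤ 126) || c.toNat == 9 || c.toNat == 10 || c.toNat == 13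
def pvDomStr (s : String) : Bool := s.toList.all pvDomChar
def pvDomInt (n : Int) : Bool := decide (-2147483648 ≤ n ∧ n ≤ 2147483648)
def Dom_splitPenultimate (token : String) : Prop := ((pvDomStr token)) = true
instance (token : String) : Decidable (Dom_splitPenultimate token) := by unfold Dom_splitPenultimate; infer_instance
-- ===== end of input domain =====

-- B replaces A's left-to-right accumulator scan by recursion from the right: find the LAST
-- camelCase boundary, split there and recurse on the prefix (alternative decomposition, same result).

-- ===== PORT A =====
def splitPenultimate (token : String) : List String :=
  let final :=
    (PySem.List.enumerate token.toList 0).foldl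
      (fun (st : List String × Int) (p : Int × Char) =>
        if PySem.Chars.isupper p.2 then
          if decide (p.1 + 1 < PySem.Str.len token) && PySem.Chars.islower ((PySem.Str.pyGet? token (p.1 + 1)).getD ' ') then
            if p.1 - 1 > 0 then
              (st.1 ++ [PySem.Str.slice token (some st.2) (some p.1)], p.1)
            else st
          else st
        else st)
      ([], 0)
  final.1 ++ [PySem.Str.slice token (some final.2) (some (PySem.Str.len token))]

-- ===== PORT B =====
-- termination: the recursive argument token[:i] is strictly shorter (i < len token)
def splitPenultimate_alt (token : String) : List String :=
  match h : (PySem.List.pyRange (PySem.Str.len token - 2) 1 (-1)).find?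
      (fun i => PySem.Chars.isupper ((PySem.Str.pyGet? token i).getD ' ')
             && PySem.Chars.islower ((PySem.Str.pyGet? token (i + 1)).getD ' ')) with
  | some i =>
      splitPenultimate_alt (PySem.Str.slice token none (some i)) ++ [PySem.Str.slice token (some i) none]
  | none => [token]
termination_by token.toList.length
decreasing_by
  have hm := List.mem_of_find?_eq_some h
  rw [PySem.List.mem_pyRange_neg_one] at hm
  simp only [PySem.Str.slice, String.toList_ofList]
  have h0 : (0:Int) ≤ i := by omega
  rw [show PySem.Chars.slice token.toList none (some i) = token.toList.take i.toNat from
    PySem.List.slice_to token.toList h0]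
  simp only [List.length_take]
  rw [PySem.Str.len_eq] at hm
  omega

-- ===== PRECONDITION & SPEC =====
def Spec_splitPenultimate (token : String) (out : List String) : Prop := out = splitPenultimate_alt token
instance (token : String) (out : List String) : Decidable (Spec_splitPenultimate token out) := by unfold Spec_splitPenultimate; infer_instance

-- ===== CLAIM (what is proved, stated in full; the proofs are below) =====
def Claim_equal_splitPenultimate : Prop := ∀ (token : String), Dom_splitPenultimate token → Spec_splitPenultimate token (splitPenultimate token)

-- ===== LEMMAS AND PROOFS =====

theorem pvUpperNotLower (c : Char) (h : PySem.Chars.isupper c = true) : PySem.Chars.islower c = false := by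
  simp [PySem.Chars.isupper, PySem.Chars.islower] at *
  intro hac
  exact absurd (le_trans hac h.2) (by decide)

-- the boundary condition of both programs, as a predicate on the index
def pvC (token : String) (j : Int) : Bool :=
  decide (j > 1) && PySem.Chars.isupper (PySem.List.pyGetD token.toList j ' ')
    && decide (j + 1 < PySem.Str.len token)
    && PySem.Chars.islower ((PySem.Str.pyGet? token (j + 1)).getD ' ')

-- the sorted list of split indices
def pvS (token : String) : List Int :=
  (PySem.List.pyRange 0 (PySem.Str.len token) 1).filter (pvC token)

-- segments between consecutive cut points, starting from a
def pvSeg (f : Int → Int → String) : Int → List Int → List String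
  | _, [] => []
  | a, b :: bsr => f a b :: pvSeg f b bsr

theorem pvSeg_congr (f g : Int → Int → String) (P : Int → Prop)
    (hfg : ∀ a b, P a → P b → f a b = g a b) :
    ∀ (l : List Int) (a : Int), P a → (∀ x ∈ l, P x) → pvSeg f a l = pvSeg g a l := by
  intro l
  induction l with
  | nil => intro a _ _; rfl
  | cons b bsr ih =>
    intro a ha hl
    simp only [pvSeg]
    rw [hfg a b ha (hl b (by simp)), ih b (hl b (by simp)) (fun x hx => hl x (by simp [hx]))]

theorem pvSeg_snoc_append (f : Int → Int → String) (m : Int) (l2 : List Int) :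
    ∀ (l1 : List Int) (a : Int), pvSeg f a (l1 ++ m :: l2) = pvSeg f a (l1 ++ [m]) ++ pvSeg f m l2 := by
  intro l1
  induction l1 with
  | nil => intro a; simp [pvSeg]
  | cons b bsr ih => intro a; simp only [List.cons_append, pvSeg, ih b, List.cons_append]

theorem pvFoldA (f : Int → Int → String) (P : Int × Char → Bool) (n : Int)
    (l : List (Int × Char)) (bs : List String) (ls : Int) :
    (l.foldl (fun st p => if P p then (st.1 ++ [f st.2 p.1], p.1) else st) (bs, ls)).1
      ++ [f (l.foldl (fun st p => if P p then (st.1 ++ [f st.2 p.1], p.1) else st) (bs, ls)).2 n]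
    = bs ++ pvSeg f ls ((l.filter P).map (·.1) ++ [n]) := by
  induction l generalizing bs ls with
  | nil => simp [pvSeg]
  | cons p l ih =>
    by_cases h : P p = true
    · simp only [List.foldl_cons, List.filter_cons, h, ite_true, List.map_cons]
      rw [ih]
      simp [pvSeg]
    · have h' : P p = false := by simpa using h
      simp only [List.foldl_cons, List.filter_cons, h', Bool.false_eq_true, ite_false]
      exact ih bs ls

theorem pvStepEq (token : String) :
    (fun (st : List String × Int) (p : Int × Char) =>
        if PySem.Chars.isupper p.2 then
          if decide (p.1 + 1 < PySem.Str.len token) && PySem.Chars.islower ((PySem.Str.pyGet? token (p.1 + 1)).getD ' ') then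
            if p.1 - 1 > 0 then
              (st.1 ++ [PySem.Str.slice token (some st.2) (some p.1)], p.1)
            else st
          else st
        else st)
    = (fun st p =>
        if (fun (p : Int × Char) => decide (p.1 > 1) && PySem.Chars.isupper p.2
              && decide (p.1 + 1 < PySem.Str.len token)
              && PySem.Chars.islower ((PySem.Str.pyGet? token (p.1 + 1)).getD ' ')) p
        then (st.1 ++ [(fun a b => PySem.Str.slice token (some a) (some b)) st.2 p.1], p.1)
        else st) := by
  funext st p
  by_cases hgt : (1 : Int) < p.1 <;>
    by_cases hu : PySem.Chars.isupper p.2 = true <;>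
      by_cases h2 : p.1 + 1 < (token.length : Int) <;>
        by_cases h3 : PySem.Chars.islower ((PySem.List.pyGet? token.toList (p.1 + 1)).getD ' ') = true <;>
          simp [hu, h2, h3, hgt]

-- A equals the canonical segment decomposition
theorem pvAeq (token : String) :
    splitPenultimate token
      = pvSeg (fun a b => PySem.Str.slice token (some a) (some b)) 0 (pvS token ++ [PySem.Str.len token]) := by
  unfold splitPenultimate
  dsimp only
  rw [pvStepEq token]
  rw [pvFoldA (fun a b => PySem.Str.slice token (some a) (some b)) _
      (PySem.Str.len token) (PySem.List.enumerate token.toList 0) [] 0]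
  rw [PySem.List.enumerate_eq_map_pyRange token.toList ' ']
  rw [List.filter_map, List.map_map]
  have : ((fun p : Int × Char => p.1) ∘ fun j => (j, PySem.List.pyGetD token.toList j ' ')) = id := by
    funext j; rfl
  rw [this, List.map_id]
  rfl

-- the predicate tested by B's scan
def pvQ (token : String) (i : Int) : Bool :=
  PySem.Chars.isupper ((PySem.Str.pyGet? token i).getD ' ')
    && PySem.Chars.islower ((PySem.Str.pyGet? token (i + 1)).getD ' ')

theorem pvC_iff (token : String) (j : Int) :
    pvC token j = (decide (j > 1) && decide (j + 1 < PySem.Str.len token) && pvQ token j) := by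
  simp only [pvC, pvQ, PySem.List.pyGetD, PySem.Str.pyGet?, PySem.Chars.pyGet?]
  generalize decide (j > 1) = d1
  generalize decide (j + 1 < PySem.Str.len token) = d2
  generalize PySem.Chars.isupper ((PySem.List.pyGet? token.toList j).getD ' ') = u
  generalize PySem.Chars.islower ((PySem.List.pyGet? token.toList (j + 1)).getD ' ') = v
  cases d1 <;> cases d2 <;> cases u <;> cases v <;> rfl

-- when the right-to-left scan finds nothing, there are no split indices
theorem pvS_nil (token : String)
    (hf : (PySem.List.pyRange (PySem.Str.len token - 2) 1 (-1)).find? (pvQ token) = none) :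
    pvS token = [] := by
  rw [pvS, List.filter_eq_nil_iff]
  intro j hj hc
  rw [pvC_iff] at hc
  simp only [Bool.and_eq_true, decide_eq_true_eq] at hc
  have hmem : j ∈ PySem.List.pyRange (PySem.Str.len token - 2) 1 (-1) := by
    rw [PySem.List.mem_pyRange_neg_one]; omega
  exact (List.find?_eq_none.mp hf j hmem) hc.2

theorem pvSlice_full (token : String) :
    PySem.Str.slice token (some 0) (some (PySem.Str.len token)) = token := by
  apply String.toList_inj.mp
  simp only [PySem.Str.slice, String.toList_ofList, PySem.Chars.slice]
  rw [PySem.List.slice_toNat token.toList (by omega) (by rw [PySem.Str.len_eq]; positivity)]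
  simp [PySem.Str.len_eq]

-- a slice of the prefix is a slice of the whole string
theorem pvSlice_slice (token : String) (i a b : Int) (ha : 0 ≤ a) (hb : 0 ≤ b) (hbi : b ≤ i) :
    PySem.Str.slice (PySem.Str.slice token none (some i)) (some a) (some b)
      = PySem.Str.slice token (some a) (some b) := by
  apply String.toList_inj.mp
  simp only [PySem.Str.slice, String.toList_ofList, PySem.Chars.slice]
  rw [PySem.List.slice_to token.toList (by omega), PySem.List.slice_toNat _ ha hb,
      PySem.List.slice_toNat _ ha hb]
  rw [List.drop_take]
  rw [List.take_take]
  congr 1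
  omega

-- the split indices of token, when i is the last one, are those of the prefix plus i
theorem pvS_split (token : String) (i : Int) (h1 : 1 < i) (h2 : i ≤ PySem.Str.len token - 2)
    (hQ : pvQ token i = true)
    (hmax : ∀ j, i < j → j ≤ PySem.Str.len token - 2 → pvQ token j = false) :
    pvS token = (PySem.List.pyRange 0 i 1).filter (pvC token) ++ [i] := by
  have hN : (0:Int) ≤ i + 1 := by omega
  rw [pvS, PySem.List.pyRange_one_append 0 i (PySem.Str.len token) (by omega) (by omega),
      PySem.List.pyRange_one_cons (by omega : i < PySem.Str.len token)]
  rw [List.filter_append]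
  have hci : pvC token i = true := by
    rw [pvC_iff]; simp only [Bool.and_eq_true, decide_eq_true_eq]
    exact ⟨⟨h1, by omega⟩, hQ⟩
  have : (PySem.List.pyRange (i + 1) (PySem.Str.len token) 1).filter (pvC token) = [] := by
    rw [List.filter_eq_nil_iff]
    intro j hj hc
    rw [PySem.List.mem_pyRange_one] at hj
    rw [pvC_iff] at hc
    simp only [Bool.and_eq_true, decide_eq_true_eq] at hc
    exact absurd (hmax j (by omega) (by omega)) (by simp [hc.2])
  rw [List.filter_cons_of_pos hci, this]

-- the prefix token[:i] has the same split indices below i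
theorem pvS_prefix (token : String) (i : Int) (h0 : 0 ≤ i) (h2 : i ≤ PySem.Str.len token)
    (hup : PySem.Chars.isupper ((PySem.Str.pyGet? token i).getD ' ') = true) :
    pvS (PySem.Str.slice token none (some i)) = (PySem.List.pyRange 0 i 1).filter (pvC token) := by
  have hlenN := PySem.Str.len_eq token
  have hLL : (token.length : Int) = PySem.Str.len token := by
    rw [hlenN, String.length_toList]
  have htl : (PySem.Str.slice token none (some i)).toList = token.toList.take i.toNat := by
    simp only [PySem.Str.slice, String.toList_ofList, PySem.Chars.slice]
    exact PySem.List.slice_to token.toList h0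
  have hplen : PySem.Str.len (PySem.Str.slice token none (some i)) = i := by
    rw [PySem.Str.len_eq, htl]
    simp only [List.length_take]
    omega
  rw [pvS, hplen]
  apply List.filter_congr
  intro j hj
  rw [PySem.List.mem_pyRange_one] at hj
  have hchar : ∀ k : Int, 0 ≤ k → k < i →
      (PySem.List.pyGet? (token.toList.take i.toNat) k).getD ' '
        = (PySem.List.pyGet? token.toList k).getD ' ' := by
    intro k hk0 hki
    have hk1 : k < ((token.toList.take i.toNat).length : Int) := by
      simp only [List.length_take]; omega
    have hk2 : k < (token.toList.length : Int) := by omega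
    have e1 := PySem.List.pyGetD_eq_getElem (token.toList.take i.toNat) ' ' hk0 hk1
    have e2 := PySem.List.pyGetD_eq_getElem token.toList ' ' hk0 hk2
    simp only [PySem.List.pyGetD] at e1 e2
    rw [e1, e2]
    simp [List.getElem_take]
  simp only [pvC, PySem.List.pyGetD, PySem.Str.pyGet?, PySem.Chars.pyGet?, htl, hplen]
  by_cases hji : j + 1 < i
  · rw [hchar j hj.1 hj.2, hchar (j + 1) (by omega) hji]
    have hd1 : decide (j + 1 < i) = true := by simp only [decide_eq_true_eq]; omega
    have hd2 : decide (j + 1 < PySem.Str.len token) = true := by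
      simp only [decide_eq_true_eq]; omega
    rw [hd1, hd2]
  · have hji' : j + 1 = i := by omega
    have hfalse : decide (j + 1 < i) = false := by
      simp only [decide_eq_false_iff_not]; omega
    rw [hfalse]
    by_cases hiN : i < PySem.Str.len token
    · have hlow : PySem.Chars.islower ((PySem.List.pyGet? token.toList (j + 1)).getD ' ') = false := by
        rw [hji']
        exact pvUpperNotLower _ (by simpa [PySem.Str.pyGet?, PySem.Chars.pyGet?] using hup)
      rw [hlow]
      simp
    · have hNfalse : decide (j + 1 < PySem.Str.len token) = false := by simp; omega
      rw [hNfalse]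
      simp

-- B equals the same decomposition
theorem pvBeq (n : Nat) : ∀ (token : String), token.toList.length ≤ n →
    splitPenultimate_alt token
      = pvSeg (fun a b => PySem.Str.slice token (some a) (some b)) 0 (pvS token ++ [PySem.Str.len token]) := by
  induction n with
  | zero =>
    intro token hlen
    have hnil : PySem.List.pyRange (PySem.Str.len token - 2) 1 (-1) = [] := by
      apply PySem.List.pyRange_neg_one_eq_nil
      rw [PySem.Str.len_eq]; omega
    rw [splitPenultimate_alt.eq_def, hnil]
    simp only [List.find?_nil]
    rw [pvS_nil token (by rw [hnil]; rfl)]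
    simp only [List.nil_append, pvSeg]
    rw [pvSlice_full]
  | succ m ih =>
    intro token hlen
    rw [splitPenultimate_alt.eq_def]
    cases hf : (PySem.List.pyRange (PySem.Str.len token - 2) 1 (-1)).find?
        (fun i => PySem.Chars.isupper ((PySem.Str.pyGet? token i).getD ' ')
               && PySem.Chars.islower ((PySem.Str.pyGet? token (i + 1)).getD ' ')) with
    | none =>
      simp only
      rw [pvS_nil token hf]
      simp only [List.nil_append, pvSeg]
      rw [pvSlice_full]
    | some i =>
      simp only
      have hfQ : (PySem.List.pyRange (PySem.Str.len token - 2) 1 (-1)).find? (pvQ token) = some i := hf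
      have hQ : pvQ token i = true := List.find?_some hfQ
      have hmem := List.mem_of_find?_eq_some hfQ
      rw [PySem.List.mem_pyRange_neg_one] at hmem
      have hmax : ∀ j, i < j → j ≤ PySem.Str.len token - 2 → pvQ token j = false := by
        obtain ⟨-, as, bs, hdec, has⟩ := List.find?_eq_some_iff_append.mp hfQ
        have hpw : (PySem.List.pyRange (PySem.Str.len token - 2) 1 (-1)).Pairwise (· > ·) := by
          rw [PySem.List.pyRange_neg_one_eq_reverse]
          exact (List.pairwise_reverse).mpr
            (PySem.List.pairwise_lt_pyRange_one 2 (PySem.Str.len token - 2 + 1))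
        intro j hij hjle
        have hjmem : j ∈ PySem.List.pyRange (PySem.Str.len token - 2) 1 (-1) := by
          rw [PySem.List.mem_pyRange_neg_one]; omega
        rw [hdec] at hjmem hpw
        rcases List.mem_append.mp hjmem with hja | hjb
        · simpa using has j hja
        · rcases List.mem_cons.mp hjb with rfl | hjbs
          · omega
          · have := (List.pairwise_append.mp hpw).2.1
            rw [List.pairwise_cons] at this
            exact absurd (this.1 j hjbs) (by omega)
      -- lengths
      have hlenN : PySem.Str.len token = (token.toList.length : Int) := PySem.Str.len_eq token
      have hpreflen : (PySem.Str.slice token none (some i)).toList.length = i.toNat := by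
        simp only [PySem.Str.slice, String.toList_ofList, PySem.Chars.slice]
        rw [PySem.List.slice_to token.toList (by omega)]
        simp only [List.length_take]
        omega
      rw [ih (PySem.Str.slice token none (some i)) (by rw [hpreflen]; omega)]
      have hpreflenI : PySem.Str.len (PySem.Str.slice token none (some i)) = i := by
        rw [PySem.Str.len_eq, hpreflen]; omega
      rw [hpreflenI]
      rw [pvS_prefix token i (by omega) (by omega) (by
        have h' := hQ; rw [pvQ] at h'; exact Bool.and_elim_left h')]
      rw [pvS_split token i hmem.1 hmem.2 hQ hmax]
      -- rewrite prefix slices to token slices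
      have hcong : pvSeg (fun a b => PySem.Str.slice (PySem.Str.slice token none (some i)) (some a) (some b)) 0
          (((PySem.List.pyRange 0 i 1).filter (pvC token)) ++ [i])
          = pvSeg (fun a b => PySem.Str.slice token (some a) (some b)) 0
          (((PySem.List.pyRange 0 i 1).filter (pvC token)) ++ [i]) := by
        apply pvSeg_congr _ _ (fun x => 0 ≤ x ∧ x ≤ i)
          (fun a b hpa hpb => pvSlice_slice token i a b hpa.1 hpb.1 hpb.2)
        · exact ⟨le_rfl, by omega⟩
        · intro x hx
          rcases List.mem_append.mp hx with hx | hx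
          · have := (List.mem_filter.mp hx).1
            rw [PySem.List.mem_pyRange_one] at this
            omega
          · simp only [List.mem_singleton] at hx
            omega
      rw [hcong]
      -- token[i:] = token[i:len]
      have htail : PySem.Str.slice token (some i) none
          = PySem.Str.slice token (some i) (some (PySem.Str.len token)) := by
        apply String.toList_inj.mp
        simp only [PySem.Str.slice, String.toList_ofList, PySem.Chars.slice]
        rw [PySem.List.slice_from token.toList (by omega), PySem.List.slice_toNat _ (by omega) (by omega)]
        have hle : (token.toList.drop i.toNat).length ≤ (PySem.Str.len token).toNat - i.toNat := by
          rw [List.length_drop, PySem.Str.len_eq]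
          omega
        rw [List.take_of_length_le hle]
      rw [htail]
      rw [show ((PySem.List.pyRange 0 i 1).filter (pvC token) ++ [i]) ++ [PySem.Str.len token]
            = (PySem.List.pyRange 0 i 1).filter (pvC token) ++ i :: [PySem.Str.len token] by simp]
      rw [pvSeg_snoc_append _ i [PySem.Str.len token]]
      simp [pvSeg]

-- ===== VERDICT (by name: the statement is the Claim_ definition above) =====
theorem splitPenultimate_spec : Claim_equal_splitPenultimate := by
  intro token _
  show splitPenultimate token = splitPenultimate_alt token
  rw [pvAeq token, pvBeq token.toList.length token le_rfl]
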